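-- pv_equiv track=rewrite | github.com/FawenYo/NTU_Programming-for-Business-Computing | Assistant/1015/problem3.py | solution
-- ===== SOURCE A (Python) =====
-- TARGET_PRODUCT = 0
--
-- def solution(inputs):
--     data = []
--     for each in inputs:
--         if each[1] == TARGET_PRODUCT:
--             data.append(each)
--     # [商人編號, 商品名稱, 評分]
--     sorted_list = sorted(data, key=lambda tup: (-tup[2], tup[0], tup[1]))
--     highest_score = sorted_list[0][2]
--     merchants = [str(sorted_list[0][0])]
--     for each in sorted_list[1:]:
--         if each[2] == highest_score:
--             merchants.append(str(each[0]))
--         else: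
--             return highest_score, merchants
--     return highest_score, merchants
-- ===== SOURCE B (Python) =====
-- TARGET_PRODUCT = 0
--
-- def solution(inputs):
--     entries = [e for e in inputs if e[1] == TARGET_PRODUCT]
--     highest = max(e[2] for e in entries)
--     top = sorted([e for e in entries if e[2] == highest], key=lambda e: e[0])
--     return highest, [str(e[0]) for e in top]
-- ===== Notes on version B (the rewrite author's own statement) =====
-- stated objective: alternative
-- what changed: A sorts the whole product-0 list by (-score, id, name) and walks the top; B computes the maximum score in one max() scan and sorts only the tied top-score subset by id.
-- outside the precondition, e.g. on solution([(1, 2, 3)]): A raises IndexError, B raises ValueError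
import Mathlib
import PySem

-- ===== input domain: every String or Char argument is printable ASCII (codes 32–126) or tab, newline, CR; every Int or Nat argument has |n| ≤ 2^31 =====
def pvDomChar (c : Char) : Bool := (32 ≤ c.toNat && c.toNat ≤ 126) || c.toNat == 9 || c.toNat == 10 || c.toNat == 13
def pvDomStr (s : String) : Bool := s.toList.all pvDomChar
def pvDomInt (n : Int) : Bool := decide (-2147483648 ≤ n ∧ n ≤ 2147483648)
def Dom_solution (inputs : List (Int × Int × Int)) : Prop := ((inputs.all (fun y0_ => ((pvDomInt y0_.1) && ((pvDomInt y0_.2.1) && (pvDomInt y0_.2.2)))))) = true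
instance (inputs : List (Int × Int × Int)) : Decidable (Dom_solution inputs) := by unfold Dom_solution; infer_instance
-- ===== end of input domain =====

-- B replaces A's full sort of all product-0 entries by a single max() scan followed by a
-- sort of the top-score subset only (alternative decomposition, same return value).

-- ===== PORT A =====
-- Python's tuple key (-tup[2], tup[0], tup[1]) as a lexicographic key
def solutionKey (t : Int × Int × Int) : Int ×ₗ Int ×ₗ Int := toLex (-t.2.2, toLex (t.1, t.2.1))

-- the 'for each in sorted_list[1:]' loop with its early return
def solutionLoop (highest : Int) (merchants : List String) : List (Int × Int × Int) → Int × List String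
  | [] => (highest, merchants)
  | e :: rest =>
      if e.2.2 == highest then solutionLoop highest (merchants ++ [PySem.Int.toStr e.1]) rest
      else (highest, merchants)

def solution (inputs : List (Int × Int × Int)) : Int × List String :=
  let data := inputs.foldl (fun acc each => if each.2.1 == 0 then acc ++ [each] else acc) []
  let sortedList := PySem.List.sorted data solutionKey
  match sortedList with
  | [] => (0, [])  -- Python raises IndexError at sorted_list[0]; excluded by Pre_solution
  | first :: rest => solutionLoop first.2.2 [PySem.Int.toStr first.1] rest

-- ===== PORT B =====
def solution_alt (inputs : List (Int × Int × Int)) : Int × List String :=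
  let entries := inputs.filter (fun e => e.2.1 == 0)
  match PySem.List.max? (entries.map (fun e => e.2.2)) (fun x => x) with
  | none => (0, [])  -- Python's max() raises ValueError; excluded by Pre_solution
  | some highest =>
      (highest,
       (PySem.List.sorted (entries.filter (fun e => e.2.2 == highest)) (fun e => e.1)).map
         (fun e => PySem.Int.toStr e.1))

-- ===== PRECONDITION & SPEC =====
-- Pre_ excludes exactly the inputs with no product-0 entry, where A raises IndexError
-- (and B raises ValueError).
def Pre_solution (inputs : List (Int × Int × Int)) : Prop := ∃ e ∈ inputs, e.2.1 = 0
instance (inputs : List (Int × Int × Int)) : Decidable (Pre_solution inputs) := by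
  unfold Pre_solution; infer_instance

def pvWitness_solution : (List (Int × Int × Int)) := [(1, 0, 5), (2, 1, 7), (3, 0, 5)]

def Spec_solution (inputs : List (Int × Int × Int)) (out : Int × List String) : Prop := out = solution_alt inputs
instance (inputs : List (Int × Int × Int)) (out : Int × List String) : Decidable (Spec_solution inputs out) := by unfold Spec_solution; infer_instance

-- ===== CLAIM (what is proved, stated in full; the proofs are below) =====
def Claim_equal_solution : Prop := ∀ (inputs : List (Int × Int × Int)), Dom_solution inputs → Pre_solution inputs → Spec_solution inputs (solution inputs)

-- ===== LEMMAS AND PROOFS =====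

-- the strict full-triple lexicographic key: injective, and it orders both tie-subset lists
def pvFullKey (t : Int × Int × Int) : Int ×ₗ Int ×ₗ Int := toLex (t.1, toLex (t.2.1, t.2.2))

lemma pvFullKey_inj : Function.Injective pvFullKey := by
  intro a b h
  unfold pvFullKey at h
  have h1 := (toLex_inj).mp h
  have h2 : a.1 = b.1 := congrArg Prod.fst h1
  have h3 := (toLex_inj).mp (congrArg Prod.snd h1)
  have h4 : a.2.1 = b.2.1 := congrArg Prod.fst h3
  have h5 : a.2.2 = b.2.2 := congrArg Prod.snd h3
  exact Prod.ext h2 (Prod.ext h4 h5)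

-- A's top-walk loop on a score-descending list with all scores ≤ h collects exactly the score-h entries
lemma solutionLoop_eq (h : Int) :
    ∀ (l : List (Int × Int × Int)) (acc : List String),
      (∀ e ∈ l, e.2.2 ≤ h) → l.Pairwise (fun a b => b.2.2 ≤ a.2.2) →
      solutionLoop h acc l =
        (h, acc ++ (l.filter (fun e => e.2.2 == h)).map (fun e => PySem.Int.toStr e.1)) := by
  intro l
  induction l with
  | nil => intro acc _ _; simp [solutionLoop]
  | cons e rest ih =>
      intro acc hle hpw
      rcases List.pairwise_cons.mp hpw with ⟨hd, htl⟩
      by_cases heq : e.2.2 = h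
      · have : (e.2.2 == h) = true := by simp [heq]
        simp only [solutionLoop, if_true, List.filter_cons, this]
        rw [ih (acc ++ [PySem.Int.toStr e.1]) (fun x hx => hle x (List.mem_cons_of_mem _ hx)) htl]
        simp
      · have hlt : e.2.2 < h := lt_of_le_of_ne (hle e (List.mem_cons_self ..)) heq
        have hrest : rest.filter (fun x => x.2.2 == h) = [] := by
          rw [List.filter_eq_nil_iff]
          intro x hx
          have : x.2.2 ≤ e.2.2 := hd x hx
          simp only [beq_iff_eq]
          omega
        have : (e.2.2 == h) = false := by simp [heq]
        simp [solutionLoop, this, hrest]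

theorem solution_spec : Claim_equal_solution := by
  intro inputs _ hpre
  unfold Spec_solution solution solution_alt
  simp only []
  -- the accumulated list is a filter
  have hdata : inputs.foldl (fun acc each => if each.2.1 == 0 then acc ++ [each] else acc) []
      = inputs.filter (fun e => e.2.1 == 0) := by
    simpa using PySem.List.foldl_append_if (l := inputs) (acc := [])
      (p := fun e => e.2.1 == 0) (f := fun x => x)
  rw [hdata]
  set data := inputs.filter (fun e => e.2.1 == 0) with hdatadef
  have hdata_ne : data ≠ [] := by
    rcases hpre with ⟨e, he, he0⟩
    intro hnil
    have : e ∈ data := by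
      rw [hdatadef, List.mem_filter]
      exact ⟨he, by simp [he0]⟩
    simp [hnil] at this
  have hprod : ∀ e ∈ data, e.2.1 = 0 := by
    intro e he
    have := (List.mem_filter.mp (hdatadef ▸ he)).2
    simpa using this
  -- the sorted list is nonempty
  rcases hsne : PySem.List.sorted data solutionKey with _ | ⟨first, rest⟩
  · exact absurd ((PySem.List.sorted_eq_nil_iff data solutionKey false).mp hsne) hdata_ne
  · set h := first.2.2 with hh
    have hsperm : (PySem.List.sorted data solutionKey).Perm data := PySem.List.sorted_perm data solutionKey false
    have hmem_s : ∀ x ∈ (first :: rest), x ∈ data := by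
      intro x hx; exact hsperm.mem_iff.mp (hsne ▸ hx)
    have hfirst_data : first ∈ data := hmem_s first (List.mem_cons_self ..)
    -- every product-0 score is ≤ h
    have hmax : ∀ y ∈ data, y.2.2 ≤ h := by
      intro y hy
      have hk := PySem.List.key_head_sorted_le data solutionKey hsne y hy
      unfold solutionKey at hk
      rcases Prod.Lex.toLex_le_toLex.mp hk with h1 | ⟨h1, _⟩ <;> simp at h1 <;> omega
    -- B's max() finds exactly h
    have hmaxB : PySem.List.max? (data.map (fun e => e.2.2)) (fun x => x) = some h := by
      rcases hm : PySem.List.max? (data.map (fun e => e.2.2)) (fun x => x) with _ | m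
      · exact absurd ((PySem.List.max?_eq_none_iff _ _).mp hm) (by simp [hdata_ne])
      · have hmem := PySem.List.max?_mem hm
        rcases List.mem_map.mp hmem with ⟨y, hy, hym⟩
        have h1 : m ≤ h := hym ▸ hmax y hy
        have h2 : h ≤ m := PySem.List.max?_isMax hm h (List.mem_map.mpr ⟨first, hfirst_data, rfl⟩)
        rw [hm, le_antisymm h1 h2]
    rw [hmaxB]
    show solutionLoop first.2.2 [PySem.Int.toStr first.1] rest
        = (h, (PySem.List.sorted (data.filter (fun e => e.2.2 == h)) (fun e => e.1)).map
            (fun e => PySem.Int.toStr e.1))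
    -- A's loop collects the score-h prefix
    have hpw : (first :: rest).Pairwise (fun a b => b.2.2 ≤ a.2.2) := by
      have := PySem.List.sorted_pairwise data solutionKey
      rw [hsne] at this
      refine this.imp ?_
      intro a b hab
      unfold solutionKey at hab
      rcases Prod.Lex.toLex_le_toLex.mp hab with h1 | ⟨h1, _⟩ <;> simp at h1 <;> omega
    have hle : ∀ e ∈ rest, e.2.2 ≤ h := fun e he => hmax e (hmem_s e (List.mem_cons_of_mem _ he))
    rw [solutionLoop_eq h rest [PySem.Int.toStr first.1]
        hle (List.pairwise_cons.mp hpw).2]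
    -- fold first back into the filtered prefix
    have hfirsteq : (first.2.2 == h) = true := by simp [hh]
    have hprefix : (first :: rest).filter (fun e => e.2.2 == h)
        = first :: rest.filter (fun e => e.2.2 == h) := by
      simp [hfirsteq]
    -- the tie subset of the sorted list equals B's id-sorted tie subset
    have hkey : (first :: rest).filter (fun e => e.2.2 == h)
        = PySem.List.sorted (data.filter (fun e => e.2.2 == h)) (fun e => e.1) := by
      apply PySem.List.eq_of_perm_of_pairwise_le_of_injective pvFullKey pvFullKey_inj
      · have p1 : ((first :: rest).filter (fun e => e.2.2 == h)).Perm
            (data.filter (fun e => e.2.2 == h)) := by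
          exact (hsne ▸ hsperm).filter _
        exact p1.trans (PySem.List.sorted_perm _ _ false).symm
      · -- subset of the sorted list, ordered by the full key
        have hp : ((first :: rest).filter (fun e => e.2.2 == h)).Pairwise
            (fun a b => solutionKey a ≤ solutionKey b) := by
          have := PySem.List.sorted_pairwise data solutionKey
          rw [hsne] at this
          exact this.filter _
        refine hp.imp_of_mem ?_
        intro a b ha hb hab
        have ha' := List.mem_filter.mp ha
        have hb' := List.mem_filter.mp hb
        have ha0 : a.2.1 = 0 := hprod a (hmem_s a ha'.1)
        have hb0 : b.2.1 = 0 := hprod b (hmem_s b hb'.1)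
        have hah : a.2.2 = h := by simpa using ha'.2
        have hbh : b.2.2 = h := by simpa using hb'.2
        unfold solutionKey at hab
        unfold pvFullKey
        rw [Prod.Lex.toLex_le_toLex] at hab ⊢
        rcases hab with h1 | ⟨h1, h2⟩
        · simp at h1; omega
        · rw [Prod.Lex.toLex_le_toLex] at h2
          rcases h2 with h2 | ⟨h2, _⟩
          · exact Or.inl h2
          · exact Or.inr ⟨h2, le_of_eq (by rw [ha0, hb0, hah, hbh])⟩
      · -- B's id-sorted subset, ordered by the full key
        have hp := PySem.List.sorted_pairwise (data.filter (fun e => e.2.2 == h)) (fun e => e.1)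
        refine hp.imp_of_mem ?_
        intro a b ha hb hab
        have ha' := List.mem_filter.mp ((PySem.List.sorted_perm _ _ false).subset ha)
        have hb' := List.mem_filter.mp ((PySem.List.sorted_perm _ _ false).subset hb)
        have ha0 : a.2.1 = 0 := hprod a ha'.1
        have hb0 : b.2.1 = 0 := hprod b hb'.1
        have hah : a.2.2 = h := by simpa using ha'.2
        have hbh : b.2.2 = h := by simpa using hb'.2
        unfold pvFullKey
        rw [Prod.Lex.toLex_le_toLex]
        rcases lt_or_eq_of_le hab with h1 | h1
        · exact Or.inl h1
        · exact Or.inr ⟨h1, le_of_eq (by rw [ha0, hb0, hah, hbh])⟩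
    rw [hprefix] at hkey
    rw [← hkey]
    simp
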